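-- pv_equiv track=rewrite | github.com/caringalhipe/cs199aclthesis | Algorithm/2/utils.py | binary_to_cover
-- ===== SOURCE A (Python) =====
-- def binary_to_cover(P, n):
--     cover_relations = []
--     for (u, v) in P:
--         if (u, v) in cover_relations:
--             continue
--         if len(cover_relations) == n - 1:
--             break
--         transitive = False
--         for w in range(1, n + 1):
--             if w == u or w == v:
--                 continue
--             else:
--                 if (u, w) in P and (w, v) in P:
--                     transitive = True
--                     break
--         if not transitive:
--             cover_relations.append((u, v))
--     return sorted(cover_relations)
-- ===== SOURCE B (Python) =====
-- def binary_to_cover(P, n):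
--     Pset = set(P)
--     adj = {}
--     for u, w in P:
--         if 1 <= w <= n:
--             adj.setdefault(u, []).append(w)
--
--     def is_cover(uv):
--         u, v = uv
--         return all(w == u or w == v or (w, v) not in Pset for w in adj.get(u, ()))
--
--     covers = [p for p in dict.fromkeys(P) if is_cover(p)]
--     if n >= 1:
--         covers = covers[:n - 1]
--     return sorted(covers)
-- ===== Notes on version B (the rewrite author's own statement) =====
-- stated objective: faster
-- what changed: B replaces A's stateful loop (appending while re-scanning the whole list and all n nodes) by a staged pipeline: build a set of P and a successor index once, order-dedup P with dict.fromkeys, filter by a cover test that scans only u's successors with O(1) set lookups, truncate to the first n-1 pairs, and sort.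
import Mathlib
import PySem

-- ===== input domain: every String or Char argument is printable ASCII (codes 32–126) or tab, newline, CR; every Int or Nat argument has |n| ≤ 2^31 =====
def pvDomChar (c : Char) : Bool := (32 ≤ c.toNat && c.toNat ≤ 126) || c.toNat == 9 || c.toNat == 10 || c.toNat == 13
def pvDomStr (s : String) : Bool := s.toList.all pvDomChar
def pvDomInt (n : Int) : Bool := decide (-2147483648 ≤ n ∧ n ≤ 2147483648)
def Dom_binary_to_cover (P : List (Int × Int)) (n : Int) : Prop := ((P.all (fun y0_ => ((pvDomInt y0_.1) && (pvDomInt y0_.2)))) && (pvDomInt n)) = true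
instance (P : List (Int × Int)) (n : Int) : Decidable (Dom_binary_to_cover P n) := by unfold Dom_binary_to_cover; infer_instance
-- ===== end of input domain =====

-- B replaces A's stateful accumulate-while-scanning loop by a staged pipeline
-- (set + successor index, ordered dedup, filter by a cover test, truncate to n-1, sort).

-- ===== PORT A =====
-- outer loop of A: recursion over the remaining pairs, carrying cover_relations;
-- the inner 'for w in range(1, n+1)' with its break is the short-circuiting List.any
def btcGoA (P : List (Int × Int)) (n : Int) : List (Int × Int) → List (Int × Int) → List (Int × Int)
  | [], cover => cover
  | (u, v) :: rest, cover =>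
    if cover.contains (u, v) then btcGoA P n rest cover
    else if (cover.length : Int) = n - 1 then cover
    else
      let transitive := (PySem.List.pyRange 1 (n + 1) 1).any (fun w =>
        if w == u || w == v then false
        else P.contains (u, w) && P.contains (w, v))
      if transitive then btcGoA P n rest cover
      else btcGoA P n rest (cover ++ [(u, v)])

def binary_to_cover (P : List (Int × Int)) (n : Int) : List (Int × Int) :=
  PySem.List.sorted2 (btcGoA P n P []) (fun x => x.1) (fun x => x.2) false

-- ===== PORT B =====
-- adj.setdefault(u, []).append(w) for 1 <= w <= n
def btcAdjB (P : List (Int × Int)) (n : Int) : PySem.Dict Int (List Int) :=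
  P.foldl (fun d uw =>
    if 1 ≤ uw.2 ∧ uw.2 ≤ n then d.insert uw.1 ((d.getD uw.1 []) ++ [uw.2]) else d)
    PySem.Dict.empty

-- is_cover(uv): no successor w of u (other than u, v) has (w, v) in Pset
def btcIsCover (Pset : PySem.Set (Int × Int)) (adj : PySem.Dict Int (List Int))
    (uv : Int × Int) : Bool :=
  (adj.getD uv.1 []).all (fun w => w == uv.1 || w == uv.2 || !Pset.contains (w, uv.2))

def binary_to_cover_alt (P : List (Int × Int)) (n : Int) : List (Int × Int) :=
  let Pset := PySem.Set.ofList P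
  let adj := btcAdjB P n
  let covers := (PySem.List.dedup P).filter (btcIsCover Pset adj)
  let covers := if 1 ≤ n then covers.take (n - 1).toNat else covers
  PySem.List.sorted2 covers (fun x => x.1) (fun x => x.2) false

-- ===== PRECONDITION & SPEC =====
def Spec_binary_to_cover (P : List (Int × Int)) (n : Int) (out : List (Int × Int)) : Prop := out = binary_to_cover_alt P n
instance (P : List (Int × Int)) (n : Int) (out : List (Int × Int)) : Decidable (Spec_binary_to_cover P n out) := by unfold Spec_binary_to_cover; infer_instance

-- ===== CLAIM (what is proved, stated in full; the proofs are below) =====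
def Claim_equal_binary_to_cover : Prop := ∀ (P : List (Int × Int)) (n : Int), Dom_binary_to_cover P n → Spec_binary_to_cover P n (binary_to_cover P n)

-- ===== LEMMAS AND PROOFS =====

-- A's transitivity test, as a predicate on a pair
def btcTA (P : List (Int × Int)) (n : Int) (p : Int × Int) : Bool :=
  (PySem.List.pyRange 1 (n + 1) 1).any (fun w =>
    if w == p.1 || w == p.2 then false
    else P.contains (p.1, w) && P.contains (w, p.2))

-- the adjacency index contains exactly the successors w of u with (u,w) ∈ P and 1 ≤ w ≤ n
lemma btcAdjB_aux (n : Int) (l : List (Int × Int)) (d : PySem.Dict Int (List Int)) (u w : Int) :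
    w ∈ (l.foldl (fun d uw =>
      if 1 ≤ uw.2 ∧ uw.2 ≤ n then d.insert uw.1 ((d.getD uw.1 []) ++ [uw.2]) else d) d).getD u []
    ↔ w ∈ d.getD u [] ∨ ((u, w) ∈ l ∧ 1 ≤ w ∧ w ≤ n) := by
  induction l generalizing d with
  | nil => simp
  | cons p rest ih =>
    obtain ⟨a, b⟩ := p
    rw [List.foldl_cons, ih]
    by_cases hb : 1 ≤ b ∧ b ≤ n
    · rw [if_pos hb, PySem.Dict.getD_insert]
      by_cases hu : u = a
      · subst hu
        rw [if_pos rfl]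
        simp only [List.mem_append, List.mem_cons, List.not_mem_nil, or_false,
          Prod.mk.injEq, true_and]
        constructor
        · rintro ((h | h) | ⟨h, hw⟩)
          · exact Or.inl h
          · subst h; exact Or.inr ⟨Or.inl rfl, hb⟩
          · exact Or.inr ⟨Or.inr h, hw⟩
        · rintro (h | ⟨h | h, hw⟩)
          · exact Or.inl (Or.inl h)
          · exact Or.inl (Or.inr h)
          · exact Or.inr ⟨h, hw⟩
      · rw [if_neg hu]
        simp only [List.mem_cons, Prod.mk.injEq]
        constructor
        · rintro (h | ⟨h, hw⟩)
          · exact Or.inl h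
          · exact Or.inr ⟨Or.inr h, hw⟩
        · rintro (h | ⟨⟨rfl, _⟩ | h, hw⟩)
          · exact Or.inl h
          · exact absurd rfl hu
          · exact Or.inr ⟨h, hw⟩
    · rw [if_neg hb]
      simp only [List.mem_cons, Prod.mk.injEq]
      constructor
      · rintro (h | ⟨h, hw⟩)
        · exact Or.inl h
        · exact Or.inr ⟨Or.inr h, hw⟩
      · rintro (h | ⟨⟨_, rfl⟩ | h, hw⟩)
        · exact Or.inl h
        · exact absurd hw hb
        · exact Or.inr ⟨h, hw⟩

lemma btcAdjB_spec (P : List (Int × Int)) (n u w : Int) :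
    w ∈ (btcAdjB P n).getD u [] ↔ ((u, w) ∈ P ∧ 1 ≤ w ∧ w ≤ n) := by
  unfold btcAdjB
  rw [btcAdjB_aux]
  simp [PySem.Dict.getD_empty]

-- the two per-pair tests are complementary
lemma btcPred_eq (P : List (Int × Int)) (n : Int) (p : Int × Int) :
    btcIsCover (PySem.Set.ofList P) (btcAdjB P n) p = !btcTA P n p := by
  obtain ⟨u, v⟩ := p
  rw [Bool.eq_iff_iff, Bool.not_eq_true', Bool.eq_false_iff]
  unfold btcIsCover btcTA
  simp only [List.all_eq_true]
  constructor
  · intro hall hany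
    rw [List.any_eq_true] at hany
    obtain ⟨w, hwmem, hif⟩ := hany
    rw [PySem.List.mem_pyRange_one] at hwmem
    by_cases huv : w = u ∨ w = v
    · have hc : (w == u || w == v) = true := by rcases huv with h | h <;> simp [h]
      simp [hc] at hif
    · rw [not_or] at huv
      have hc : (w == u || w == v) = false := by simp [huv.1, huv.2]
      simp only [hc, Bool.false_eq_true, if_false, Bool.and_eq_true,
        List.contains_iff_mem] at hif
      have hadj : w ∈ (btcAdjB P n).getD u [] :=
        (btcAdjB_spec P n u w).2 ⟨hif.1, hwmem.1, by omega⟩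
      have h2 := hall w hadj
      simp only [Bool.or_eq_true, beq_iff_eq, huv.1, huv.2, false_or, or_false,
        Bool.not_eq_true'] at h2
      rw [Bool.eq_false_iff, Ne, PySem.Set.contains_iff, PySem.Set.mem_ofList] at h2
      exact h2 hif.2
  · intro hno w hw
    obtain ⟨hP, h1, h2⟩ := (btcAdjB_spec P n u w).1 hw
    by_cases huv : w = u ∨ w = v
    · rcases huv with h | h <;> simp [h]
    · rw [not_or] at huv
      have hc : (w == u || w == v) = false := by simp [huv.1, huv.2]
      simp only [Bool.or_eq_true, beq_iff_eq, huv.1, huv.2, false_or, or_false,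
        Bool.not_eq_true']
      rw [Bool.eq_false_iff, Ne, PySem.Set.contains_iff, PySem.Set.mem_ofList]
      intro hcv
      apply hno
      rw [List.any_eq_true]
      refine ⟨w, ?_, ?_⟩
      · rw [PySem.List.mem_pyRange_one]; omega
      · simp [hc, hP, hcv]

-- ordered dedup relative to an accumulated seen list
def btcDds (seen : List (Int × Int)) : List (Int × Int) → List (Int × Int)
  | [] => []
  | p :: rest => if seen.contains p then btcDds seen rest else p :: btcDds (seen ++ [p]) rest

lemma btcFoldl_add_eq (xs seen : List (Int × Int)) :
    xs.foldl PySem.Set.add seen = seen ++ btcDds seen xs := by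
  induction xs generalizing seen with
  | nil => simp [btcDds]
  | cons p rest ih =>
    rw [List.foldl_cons, btcDds]
    by_cases h : seen.contains p = true
    · rw [if_pos h]
      have hmem : p ∈ seen := List.contains_iff_mem.mp h
      have hadd : PySem.Set.add seen p = seen := by
        simp [PySem.Set.add, hmem]
      rw [hadd, ih]
    · rw [if_neg h]
      have hmem : p ∉ seen := by simpa [List.contains_iff_mem] using h
      have hadd : PySem.Set.add seen p = seen ++ [p] := by
        simp [PySem.Set.add, hmem]
      rw [hadd, ih]
      simp

-- B's filter pipeline, relative to the accumulated cover (distinct non-transitive pairs seen so far)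
def btcF (t : Int × Int → Bool) (cover : List (Int × Int)) : List (Int × Int) → List (Int × Int)
  | [] => []
  | p :: rest =>
    if cover.contains p then btcF t cover rest
    else if t p then btcF t cover rest
    else p :: btcF t (cover ++ [p]) rest

-- F computes filter-of-dedup whenever seen extends cover only by transitive pairs
lemma btcF_eq_filter_dds (t : Int × Int → Bool) (rest cover seen : List (Int × Int))
    (h1 : ∀ q ∈ cover, q ∈ seen) (h2 : ∀ q ∈ seen, q ∉ cover → t q = true) :
    btcF t cover rest = (btcDds seen rest).filter (fun p => !t p) := by
  induction rest generalizing cover seen with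
  | nil => simp [btcF, btcDds]
  | cons p rest ih =>
    rw [btcF, btcDds]
    by_cases hc : p ∈ cover
    · rw [if_pos (by rwa [List.contains_iff_mem]),
        if_pos (by rw [List.contains_iff_mem]; exact h1 p hc)]
      exact ih cover seen h1 h2
    · rw [if_neg (by rwa [List.contains_iff_mem])]
      by_cases ht : t p = true
      · rw [if_pos ht]
        by_cases hs : p ∈ seen
        · rw [if_pos (by rwa [List.contains_iff_mem])]
          exact ih cover seen h1 h2
        · rw [if_neg (by rwa [List.contains_iff_mem]), List.filter_cons, if_neg (by simp [ht])]
          exact ih cover (seen ++ [p])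
            (fun q hq => List.mem_append_left _ (h1 q hq))
            (fun q hq hnq => by
              rcases List.mem_append.1 hq with h | h
              · exact h2 q h hnq
              · simp only [List.mem_singleton] at h; subst h; exact ht)
      · have hs : p ∉ seen := fun hmem => ht (h2 p hmem hc)
        rw [if_neg ht, if_neg (by rwa [List.contains_iff_mem]), List.filter_cons,
          if_pos (by simp [Bool.not_eq_true] at ht ⊢; exact ht)]
        congr 1
        exact ih (cover ++ [p]) (seen ++ [p])
          (fun q hq => by
            rcases List.mem_append.1 hq with h | h
            · exact List.mem_append_left _ (h1 q h)
            · exact List.mem_append_right _ h)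
          (fun q hq hnq => by
            rcases List.mem_append.1 hq with h | h
            · exact h2 q h (fun hq' => hnq (List.mem_append_left _ hq'))
            · exact absurd (List.mem_append_right _ h) hnq)

-- A's loop = cover ++ (capped F), by induction with the length invariant
lemma btcGoA_eq (P : List (Int × Int)) (n : Int) (rest cover : List (Int × Int))
    (hlen : 1 ≤ n → (cover.length : Int) ≤ n - 1) :
    btcGoA P n rest cover
      = cover ++ (if 1 ≤ n then (btcF (btcTA P n) cover rest).take ((n - 1) - cover.length).toNat
                  else btcF (btcTA P n) cover rest) := by
  induction rest generalizing cover with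
  | nil => simp [btcGoA, btcF]
  | cons p rest ih =>
    obtain ⟨u, v⟩ := p
    rw [btcGoA, btcF]
    by_cases hc : cover.contains (u, v)
    · rw [if_pos hc, if_pos hc]
      exact ih cover hlen
    · rw [if_neg hc, if_neg hc]
      by_cases hl : (cover.length : Int) = n - 1
      · rw [if_pos hl]
        have hn : 1 ≤ n := by omega
        rw [if_pos hn]
        have : ((n - 1) - (cover.length : Int)).toNat = 0 := by omega
        simp [this]
      · rw [if_neg hl]
        have ht : ((PySem.List.pyRange 1 (n + 1) 1).any (fun w =>
            if w == u || w == v then false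
            else P.contains (u, w) && P.contains (w, v))) = btcTA P n (u, v) := rfl
        simp only [ht]
        by_cases htr : btcTA P n (u, v) = true
        · rw [if_pos htr, if_pos htr]
          exact ih cover hlen
        · rw [if_neg htr, if_neg htr]
          rw [ih (cover ++ [(u, v)]) (by intro hn; have := hlen hn; simp; omega)]
          by_cases hn : 1 ≤ n
          · rw [if_pos hn, if_pos hn]
            have hlt : (cover.length : Int) < n - 1 := lt_of_le_of_ne (hlen hn) hl
            have h1 : ((n - 1) - (cover.length : Int)).toNat
                = (((n - 1) - ((cover.length : Int) + 1)).toNat) + 1 := by omega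
            simp only [List.length_append, List.length_singleton, Nat.cast_add, Nat.cast_one]
            rw [h1, List.take_succ_cons, List.append_assoc]
            rfl
          · rw [if_neg hn, if_neg hn]
            simp

-- ===== VERDICT (by name: the statement is the Claim_ definition above) =====
theorem binary_to_cover_spec : Claim_equal_binary_to_cover := by
  intro P n _
  unfold Spec_binary_to_cover binary_to_cover binary_to_cover_alt
  rw [btcGoA_eq P n P [] (by intro h; simp; omega)]
  have hdd : PySem.List.dedup P = btcDds [] P := by
    have := btcFoldl_add_eq P []
    simpa [PySem.List.dedup_eq_ofList, PySem.Set.ofList_eq_foldl] using this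
  have hF : btcF (btcTA P n) [] P = (PySem.List.dedup P).filter (btcIsCover (PySem.Set.ofList P) (btcAdjB P n)) := by
    rw [btcF_eq_filter_dds (btcTA P n) P [] [] (by simp) (by simp), hdd]
    exact List.filter_congr (fun p _ => by rw [btcPred_eq])
  simp only [List.nil_append, List.length_nil, Nat.cast_zero, sub_zero, hF]
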